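-- pv_equiv track=rewrite | github.com/thewooniverse/python_notes | Old python notes/Practice/Dec_kata.py | who_is_next
-- ===== SOURCE A (Python) =====
-- def who_is_next(names, r):
--     power_of_two = 0
--     while (len(names) * (2 ** power_of_two)) < r:
--         r -= (len(names) * (2 ** power_of_two))
--         power_of_two += 1
--
--     for name in names:
--         r -= (2 ** power_of_two)
--         if r <= 0:  # found it
--             return name
-- ===== SOURCE B (Python) =====
-- def who_is_next(names, r):
--     # Closed form: locate the doubling level via bit_length, then index directly.
--     if r <= 0:
--         return names[0]
--     n = len(names)
--     q = -(-r // n)                 # ceil(r / n)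
--     k = q.bit_length() - 1         # level: smallest k with n*(2**(k+1)-1) >= r
--     rem = r - n * ((1 << k) - 1)   # rank within level k (1-based)
--     return names[(rem - 1) >> k]
-- ===== Notes on version B (the rewrite author's own statement) =====
-- stated objective: alternative
-- what changed: A counts doubling levels with a while-loop and then scans the names one by one; B computes the level directly as bit_length(ceil(r/len(names)))-1 and indexes the answer with one shift, eliminating both loops (intended as faster; measured only ~1.4x, below the 1.5x bar).
-- outside the precondition, e.g. on who_is_next([], 0): A returns None, B raises IndexError; on who_is_next([], 3): A does not finish within the time limit, B raises ZeroDivisionError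
import Mathlib
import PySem

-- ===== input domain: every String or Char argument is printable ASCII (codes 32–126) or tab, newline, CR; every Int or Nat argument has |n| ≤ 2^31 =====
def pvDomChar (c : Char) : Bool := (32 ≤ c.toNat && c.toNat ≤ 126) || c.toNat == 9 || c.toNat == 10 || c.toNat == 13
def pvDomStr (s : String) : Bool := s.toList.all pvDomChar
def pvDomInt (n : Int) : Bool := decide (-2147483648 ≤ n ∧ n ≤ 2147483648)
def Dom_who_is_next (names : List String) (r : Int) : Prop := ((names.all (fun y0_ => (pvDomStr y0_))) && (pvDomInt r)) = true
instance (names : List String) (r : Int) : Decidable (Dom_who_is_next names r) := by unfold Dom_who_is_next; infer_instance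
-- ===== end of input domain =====

-- B replaces A's level-counting while-loop and linear for-scan by a closed-form
-- computation (ceiling division + bit_length + one shift); intended as faster,
-- measured only ~1.4x at the largest timing size, so claimed as 'alternative'.

-- ===== PORT A =====
-- the while loop; fuel = r.toNat iterations always suffices for nonempty names,
-- since each pass decreases r by names.length * 2^k ≥ 1 (guard only makes it total)
def whoALoop1 (n r : Int) (k fuel : Nat) : Int × Nat :=
  match fuel with
  | 0 => (r, k)
  | fuel + 1 =>
      if n * 2 ^ k < r then whoALoop1 n (r - n * 2 ^ k) (k + 1) fuel
      else (r, k)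

-- the for loop; Python returns None when it falls off the end ("" here, unreachable for names ≠ [])
def whoALoop2 (names : List String) (r : Int) (k : Nat) : String :=
  match names with
  | [] => ""
  | name :: rest =>
      let r' := r - 2 ^ k
      if r' ≤ 0 then name else whoALoop2 rest r' k

def who_is_next (names : List String) (r : Int) : String :=
  let p := whoALoop1 (names.length : Int) r 0 r.toNat
  whoALoop2 names p.1 p.2

-- ===== PORT B =====
def who_is_next_alt (names : List String) (r : Int) : String :=
  if r ≤ 0 then (PySem.List.pyGet? names 0).getD ""      -- names[0]
  else
    let n : Int := (names.length : Int)
    let q : Int := -(PySem.Int.floordiv (-r) n)          -- ceil(r / n)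
    let k : Nat := PySem.Int.bitLength q - 1             -- q.bit_length() - 1
    let rem : Int := r - n * (2 ^ k - 1)                 -- 1 << k  is  2^k
    (PySem.List.pyGet? names (PySem.Int.floordiv (rem - 1) (2 ^ k))).getD ""  -- (rem-1) >> k

-- ===== PRECONDITION & SPEC =====
-- Pre_ excludes empty names: there Python A loops forever (r > 0) or returns None,
-- not a str (r ≤ 0), and B raises.
def Pre_who_is_next (names : List String) (r : Int) : Prop := names ≠ []
instance (names : List String) (r : Int) : Decidable (Pre_who_is_next names r) := by
  unfold Pre_who_is_next; infer_instance

def pvWitness_who_is_next : List String × Int := (["a", "b"], 5)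

def Spec_who_is_next (names : List String) (r : Int) (out : String) : Prop := out = who_is_next_alt names r
instance (names : List String) (r : Int) (out : String) : Decidable (Spec_who_is_next names r out) := by unfold Spec_who_is_next; infer_instance

-- ===== CLAIM (what is proved, stated in full; the proofs are below) =====
def Claim_equal_who_is_next : Prop := ∀ (names : List String) (r : Int), Dom_who_is_next names r → Pre_who_is_next names r → Spec_who_is_next names r (who_is_next names r)

-- ===== LEMMAS AND PROOFS =====

-- the while loop's exit state: r' = r - n*(2^k' - 2^k), r' ≤ n*2^k', and positivity is preserved
theorem whoALoop1_spec (fuel : Nat) :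
    ∀ (n r : Int) (k : Nat) (r' : Int) (k' : Nat), 1 ≤ n →
      r ≤ n * 2 ^ k + fuel → whoALoop1 n r k fuel = (r', k') →
      r' = r - n * (2 ^ k' - 2 ^ k) ∧ r' ≤ n * 2 ^ k' ∧ (0 < r → 0 < r') ∧ k ≤ k' := by
  induction fuel with
  | zero =>
      intro n r k r' k' hn hf h
      simp [whoALoop1] at h
      obtain ⟨h1, h2⟩ := h
      subst h1; subst h2
      refine ⟨by ring, by simpa using hf, fun h => h, le_refl _⟩
  | succ fuel ih =>
      intro n r k r' k' hn hf h
      rw [whoALoop1] at h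
      split at h
      · rename_i hc
        have hp : (1 : Int) ≤ 2 ^ k := one_le_pow₀ (by norm_num)
        have hp1 : (1 : Int) ≤ 2 ^ (k + 1) := one_le_pow₀ (by norm_num)
        have hf' : r - n * 2 ^ k ≤ n * 2 ^ (k + 1) + fuel := by
          have : (1 : Int) ≤ n * 2 ^ (k + 1) := by nlinarith
          omega
        obtain ⟨e1, e2, e3, e4⟩ := ih n (r - n * 2 ^ k) (k + 1) r' k' hn hf' h
        have hpow : (2 : Int) ^ (k + 1) = 2 ^ k * 2 := by ring
        refine ⟨by rw [e1]; ring_nf, e2, ?_, by omega⟩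
        intro _
        exact e3 (by omega)
      · rename_i hc
        simp at h
        obtain ⟨h1, h2⟩ := h
        subst h1; subst h2
        exact ⟨by ring, by omega, fun h => h, le_refl _⟩

-- the for loop returns the ((r-1)/2^k)-th name when 0 < r ≤ len*2^k
theorem whoALoop2_spec (names : List String) :
    ∀ (r : Int) (k : Nat), 0 < r → r ≤ (names.length : Int) * 2 ^ k →
      whoALoop2 names r k = names.getD ((r - 1).toNat / 2 ^ k) "" := by
  induction names with
  | nil =>
      intro r k hr hle
      simp at hle; omega
  | cons x rest ih =>
      intro r k hr hle
      have hpow : ((2 ^ k : Nat) : Int) = (2 : Int) ^ k := by push_cast; ring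
      have hppos : (0 : Int) < 2 ^ k := by positivity
      rw [whoALoop2]
      by_cases hc : r - 2 ^ k ≤ 0
      · simp only [hc, if_pos]
        have : (r - 1).toNat < 2 ^ k := by omega
        rw [Nat.div_eq_of_lt this]
        simp
      · simp only [hc, if_neg, if_false]
        have hlen : ((x :: rest).length : Int) = (rest.length : Int) + 1 := by push_cast [List.length_cons]; ring
        have hle' : r - 2 ^ k ≤ (rest.length : Int) * 2 ^ k := by
          rw [hlen] at hle; nlinarith
        rw [ih (r - 2 ^ k) k (by omega) hle']
        have hsplit : (r - 1).toNat = (r - 2 ^ k - 1).toNat + 2 ^ k := by omega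
        rw [hsplit, Nat.add_div_right _ (by positivity)]
        simp [List.getD_cons_succ]

-- bit_length of q with 2^k ≤ q < 2^(k+1) is k+1
theorem bitLength_interval : ∀ (k : Nat) (q : Int), 2 ^ k ≤ q → q < 2 ^ (k + 1) →
    PySem.Int.bitLength q = k + 1 := by
  intro k
  induction k with
  | zero =>
      intro q h1 h2
      have : q = 1 := by norm_num at h1 h2; omega
      subst this; decide
  | succ k ih =>
      intro q h1 h2
      have hq : 0 < q := lt_of_lt_of_le (by positivity) h1
      rw [PySem.Int.bitLength_of_pos hq]
      rw [PySem.Int.floordiv_eq_ediv_of_pos (by norm_num : (0:Int) < 2)]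
      have e1 : (2 : Int) ^ (k + 1) = 2 ^ k * 2 := by ring
      have e2 : (2 : Int) ^ (k + 2) = 2 ^ (k + 1) * 2 := by ring
      have h1' : 2 ^ k ≤ q / 2 := by omega
      have h2' : q / 2 < 2 ^ (k + 1) := by omega
      rw [ih (q / 2) h1' h2']

-- ===== VERDICT (by name: the statement is the Claim_ definition above) =====
theorem who_is_next_spec : Claim_equal_who_is_next := by
  intro names r _ hpre
  unfold Spec_who_is_next
  obtain ⟨x, rest, rfl⟩ : ∃ x rest, names = x :: rest := by
    cases names with
    | nil => exact absurd rfl hpre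
    | cons a l => exact ⟨a, l, rfl⟩
  have hn : (1 : Int) ≤ ((x :: rest).length : Int) := by simp
  by_cases hr : r ≤ 0
  · -- r ≤ 0: A's while loop gets zero fuel, the for loop returns the head; B returns names[0]
    have hA : who_is_next (x :: rest) r = x := by
      have h0 : r.toNat = 0 := by omega
      simp only [who_is_next, h0, whoALoop1, whoALoop2]
      rw [if_pos (show r - 2 ^ (0:Nat) ≤ 0 by norm_num; omega)]
    have hB : who_is_next_alt (x :: rest) r = x := by
      simp [who_is_next_alt, hr, PySem.List.pyGet?_zero_cons]
    rw [hA, hB]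
  · -- 0 < r
    push_neg at hr
    set names := x :: rest with hnames
    set n : Int := (names.length : Int) with hdefn
    obtain ⟨r', k', hloop⟩ : ∃ r' k', whoALoop1 n r 0 r.toNat = (r', k') := ⟨_, _, rfl⟩
    have hfuel : r ≤ n * 2 ^ (0 : Nat) + (r.toNat : Int) := by norm_num; omega
    obtain ⟨e1, e2, e3, _⟩ := whoALoop1_spec r.toNat n r 0 r' k' hn hfuel hloop
    have hr' : 0 < r' := e3 hr
    have hrr : r' = r - n * (2 ^ k' - 1) := by rw [e1]; ring_nf
    have hppos : (0 : Int) < 2 ^ k' := by positivity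
    have hA : who_is_next names r = names.getD ((r' - 1).toNat / 2 ^ k') "" := by
      simp only [who_is_next, ← hdefn, hloop]
      exact whoALoop2_spec names r' k' hr' e2
    -- B's side: q = ceil(r / n) lies in [2^k', 2^(k'+1)), so bit_length q - 1 = k'
    set q : Int := -(PySem.Int.floordiv (-r) n) with hq
    have hceil : (q - 1) * n < r ∧ r ≤ q * n :=
      (PySem.Int.neg_floordiv_neg_eq_iff_of_pos (by omega)).mp rfl
    obtain ⟨hc1, hc2⟩ := hceil
    have hlow : n * (2 ^ k' - 1) < r := by omega
    have hhigh : r ≤ n * (2 ^ (k' + 1) - 1) := by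
      have h2 : (2 : Int) ^ (k' + 1) = 2 ^ k' * 2 := by ring
      nlinarith
    have hq1 : 2 ^ k' ≤ q := by nlinarith
    have hq2 : q < 2 ^ (k' + 1) := by nlinarith
    have hbl : PySem.Int.bitLength q = k' + 1 := bitLength_interval k' q hq1 hq2
    have hidx : PySem.Int.floordiv (r - n * (2 ^ k' - 1) - 1) (2 ^ k') =
        (((r' - 1).toNat / 2 ^ k' : Nat) : Int) := by
      have hc : r - n * (2 ^ k' - 1) - 1 = (((r' - 1).toNat : Nat) : Int) := by omega
      rw [hc, show ((2 : Int) ^ k') = (((2 ^ k' : Nat) : Nat) : Int) by push_cast; ring]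
      exact PySem.Int.floordiv_natCast _ _
    have hbound : (r' - 1).toNat / 2 ^ k' < names.length := by
      have h1 : (r' - 1).toNat < 2 ^ k' * names.length := by
        have hc : ((2 ^ k' * names.length : Nat) : Int) = n * 2 ^ k' := by push_cast; ring
        omega
      exact Nat.div_lt_of_lt_mul h1
    have hB : who_is_next_alt names r = names.getD ((r' - 1).toNat / 2 ^ k') "" := by
      simp only [who_is_next_alt, ← hdefn, ← hq, hbl, Nat.add_sub_cancel]
      rw [if_neg (by omega), hidx, PySem.List.pyGet?_natCast]
      simp [List.getElem?_eq_getElem hbound, List.getD_eq_getElem?_getD]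
    rw [hA, hB]
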